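-- pv_equiv track=rewrite | github.com/Leroymilo/Puzzle-Box | __logic__.py | getTruePaths
-- ===== SOURCE A (Python) =====
-- def getTruePaths(paths, delta) :
--     truePaths = []
--     nodePaths = []
--
--     for ii in range(len(paths)) :
--         path, truePath = paths[ii], []
--         nodePath = chain2nodes(path)
--         nodePaths.append(nodePath)
--
--         for jj in range(len(nodePath)-1) :
--             s, e = nodePath[jj], nodePath[jj+1]
--             if s[0] == e[0] :
--                 direction = 0
--             else :
--                 direction = 1
--             c = countOverlap(nodePaths, s, e, direction)
--             offset = getOffset(c)
--
--             if jj == 0 :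
--                 truePath.append((s[0]*delta + delta//2, s[1]*delta + delta//2))
--             truePath[-1] = addOffset(truePath[-1], offset, direction)
--             truePath.append((e[0]*delta + delta//2, e[1]*delta + delta//2))
--             truePath[-1] = addOffset(truePath[-1], offset, direction)
--
--         truePaths.append(truePath)
--     return truePaths
--
-- def chain2nodes(chain) :
--     nodes = [chain[0]]
--     for ii in range(1, len(chain)-1) :
--         C0 = chain[ii-1]
--         C1 = chain[ii]
--         C2 = chain[ii+1]
--         if C0[0] == C1[0] == C2[0] :
--             None
--         elif C0[1] == C1[1] == C2[1] :
--             None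
--         else :
--             nodes.append(C1)
--     return nodes + [chain[-1]]
--
-- def getOffset(count) :
--     if count%2 == 0 :
--         return -count
--     return count + 1
--
-- def overlap(s1, e1, s2, e2, d) :
--     if s2[d] == e2[d] == s1[d] :
--         if s1[1-d] <= s2[1-d] <= e1[1-d] or s1[1-d] <= e2[1-d] <= e1[1-d] :
--             return True
--     return False
--
-- def countOverlap(paths, s1, e1, d) :
--     count = 0
--     for path in paths[:-1] :
--         for kk in range(len(path)-1) :
--             s2, e2 = path[kk], path[kk+1]
--             if overlap(s1, e1, s2, e2, d) :
--                 count += 1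
--     return count
--
-- def addOffset(C, offset, d) :
--     return (C[0] + (1-d)*offset, C[1] + d*offset)
-- ===== SOURCE B (Python) =====
-- def getTruePaths(paths, delta):
--     # dict index of previous paths' axis-aligned segments by (direction, fixed coordinate);
--     # per-node closed form replaces A's in-place last-element patching
--     index = {}
--     truePaths = []
--     half = delta // 2
--     for path in paths:
--         nodes = chain_to_nodes(path)
--         segs = list(zip(nodes, nodes[1:]))
--         vecs = []
--         for s, e in segs:
--             d = 0 if s[0] == e[0] else 1
--             c = 0
--             for s2, e2 in index.get((d, s[d]), []):
--                 if s[1 - d] <= s2[1 - d] <= e[1 - d] or s[1 - d] <= e2[1 - d] <= e[1 - d]: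
--                     c += 1
--             off = -c if c % 2 == 0 else c + 1
--             vecs.append((off, 0) if d == 0 else (0, off))
--         truePath = []
--         n = len(nodes)
--         for i in range(n):
--             x = nodes[i][0] * delta + half
--             y = nodes[i][1] * delta + half
--             if i > 0:
--                 x += vecs[i - 1][0]
--                 y += vecs[i - 1][1]
--             if i < n - 1:
--                 x += vecs[i][0]
--                 y += vecs[i][1]
--             truePath.append((x, y))
--         truePaths.append(truePath)
--         for s, e in segs:
--             for d in (0, 1):
--                 if s[d] == e[d]:
--                     index.setdefault((d, s[d]), []).append((s, e))
--     return truePaths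
--
-- def chain_to_nodes(chain):
--     nodes = [chain[0]]
--     for prev, cur, nxt in zip(chain, chain[1:], chain[2:]):
--         if not (prev[0] == cur[0] == nxt[0] or prev[1] == cur[1] == nxt[1]):
--             nodes.append(cur)
--     nodes.append(chain[-1])
--     return nodes
-- ===== Notes on version B (the rewrite author's own statement) =====
-- stated objective: faster
-- what changed: B replaces A's per-segment rescan of every segment of all previous paths (countOverlap) by a dict that indexes previous paths' axis-aligned segments under (direction, fixed coordinate), so each segment is compared only against collinear segments, and it builds each output point by a per-node closed form (base point plus the offset vectors of its adjacent segments) instead of A's append-then-patch-last-element loop.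
import Mathlib
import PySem

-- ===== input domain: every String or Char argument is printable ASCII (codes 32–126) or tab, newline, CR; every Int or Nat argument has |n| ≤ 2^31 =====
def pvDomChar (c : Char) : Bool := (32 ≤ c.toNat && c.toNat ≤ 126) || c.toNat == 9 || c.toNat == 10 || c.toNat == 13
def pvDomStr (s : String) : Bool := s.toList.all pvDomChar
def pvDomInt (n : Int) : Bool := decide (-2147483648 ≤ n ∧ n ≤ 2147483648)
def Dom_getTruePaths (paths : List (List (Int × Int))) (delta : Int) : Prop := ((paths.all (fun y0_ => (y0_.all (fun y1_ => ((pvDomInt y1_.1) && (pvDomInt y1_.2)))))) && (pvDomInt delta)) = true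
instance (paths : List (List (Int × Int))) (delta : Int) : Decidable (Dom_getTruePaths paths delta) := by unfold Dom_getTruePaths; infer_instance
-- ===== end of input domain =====

-- B indexes the axis-aligned segments of earlier paths in a dict keyed by (direction, fixed
-- coordinate), so each segment's overlap count scans only collinear segments instead of all of
-- them, and each output point is computed by a per-node closed form instead of A's in-place
-- last-element patching (objective: faster).

-- ===== PORT A =====
def pyProj (C : Int × Int) (d : Int) : Int := if d = 0 then C.1 else C.2

def pyChain2nodes (chain : List (Int × Int)) : List (Int × Int) :=
  let nodes : List (Int × Int) := [PySem.List.pyGetD chain 0 (0, 0)]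
  let nodes := (PySem.List.pyRange 1 (PySem.List.len chain - 1) 1).foldl (fun nodes ii =>
    let C0 := PySem.List.pyGetD chain (ii - 1) (0, 0)
    let C1 := PySem.List.pyGetD chain ii (0, 0)
    let C2 := PySem.List.pyGetD chain (ii + 1) (0, 0)
    if C0.1 = C1.1 ∧ C1.1 = C2.1 then nodes
    else if C0.2 = C1.2 ∧ C1.2 = C2.2 then nodes
    else nodes ++ [C1]) nodes
  nodes ++ [PySem.List.pyGetD chain (-1) (0, 0)]

def pyGetOffset (count : Int) : Int :=
  if PySem.Int.mod count 2 = 0 then -count else count + 1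

def pyOverlap (s1 e1 s2 e2 : Int × Int) (d : Int) : Bool :=
  if pyProj s2 d = pyProj e2 d ∧ pyProj e2 d = pyProj s1 d then
    decide ((pyProj s1 (1 - d) ≤ pyProj s2 (1 - d) ∧ pyProj s2 (1 - d) ≤ pyProj e1 (1 - d)) ∨
            (pyProj s1 (1 - d) ≤ pyProj e2 (1 - d) ∧ pyProj e2 (1 - d) ≤ pyProj e1 (1 - d)))
  else false

def pyCountOverlap (paths : List (List (Int × Int))) (s1 e1 : Int × Int) (d : Int) : Int :=
  (PySem.List.slice paths none (some (-1))).foldl (fun count path =>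
    (PySem.List.pyRange 0 (PySem.List.len path - 1) 1).foldl (fun count kk =>
      let s2 := PySem.List.pyGetD path kk (0, 0)
      let e2 := PySem.List.pyGetD path (kk + 1) (0, 0)
      if pyOverlap s1 e1 s2 e2 d then count + 1 else count) count) 0

def pyAddOffset (C : Int × Int) (offset d : Int) : Int × Int :=
  (C.1 + (1 - d) * offset, C.2 + d * offset)

def getTruePaths (paths : List (List (Int × Int))) (delta : Int) : List (List (Int × Int)) :=
  let st := (PySem.List.pyRange 0 (PySem.List.len paths) 1).foldl
    (fun (st : List (List (Int × Int)) × List (List (Int × Int))) ii =>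
      let truePaths := st.1
      let path := PySem.List.pyGetD paths ii []
      let nodePath := pyChain2nodes path
      let nodePaths := st.2 ++ [nodePath]
      let truePath := (PySem.List.pyRange 0 (PySem.List.len nodePath - 1) 1).foldl
        (fun truePath jj =>
          let s := PySem.List.pyGetD nodePath jj (0, 0)
          let e := PySem.List.pyGetD nodePath (jj + 1) (0, 0)
          let d : Int := if s.1 = e.1 then 0 else 1
          let c := pyCountOverlap nodePaths s e d
          let offset := pyGetOffset c
          let truePath := if jj = 0 then
              truePath ++ [(s.1 * delta + PySem.Int.floordiv delta 2, s.2 * delta + PySem.Int.floordiv delta 2)]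
            else truePath
          let truePath := truePath.dropLast ++ [pyAddOffset (PySem.List.pyGetD truePath (-1) (0, 0)) offset d]
          let truePath := truePath ++ [(e.1 * delta + PySem.Int.floordiv delta 2, e.2 * delta + PySem.Int.floordiv delta 2)]
          truePath.dropLast ++ [pyAddOffset (PySem.List.pyGetD truePath (-1) (0, 0)) offset d]) []
      (truePaths ++ [truePath], nodePaths)) ([], [])
  st.1

-- ===== PORT B =====
def altChainToNodes (chain : List (Int × Int)) : List (Int × Int) :=
  let nodes : List (Int × Int) := [PySem.List.pyGetD chain 0 (0, 0)]
  let nodes := (chain.zip (chain.tail.zip chain.tail.tail)).foldl (fun nodes t =>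
    if ¬ ((t.1.1 = t.2.1.1 ∧ t.2.1.1 = t.2.2.1) ∨ (t.1.2 = t.2.1.2 ∧ t.2.1.2 = t.2.2.2)) then
      nodes ++ [t.2.1]
    else nodes) nodes
  nodes ++ [PySem.List.pyGetD chain (-1) (0, 0)]

def getTruePaths_alt (paths : List (List (Int × Int))) (delta : Int) : List (List (Int × Int)) :=
  let half := PySem.Int.floordiv delta 2
  let st := paths.foldl
    (fun (st : PySem.Dict (Int × Int) (List ((Int × Int) × (Int × Int))) × List (List (Int × Int))) path =>
      let index := st.1
      let nodes := altChainToNodes path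
      let segs := nodes.zip nodes.tail
      let vecs : List (Int × Int) := segs.foldl (fun vecs se =>
        let s := se.1
        let e := se.2
        let d : Int := if s.1 = e.1 then 0 else 1
        let c : Int := (index.getD (d, pyProj s d) []).foldl (fun c p =>
          if (pyProj s (1 - d) ≤ pyProj p.1 (1 - d) ∧ pyProj p.1 (1 - d) ≤ pyProj e (1 - d)) ∨
             (pyProj s (1 - d) ≤ pyProj p.2 (1 - d) ∧ pyProj p.2 (1 - d) ≤ pyProj e (1 - d)) then c + 1
          else c) 0
        let off := if PySem.Int.mod c 2 = 0 then -c else c + 1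
        vecs ++ [if d = 0 then ((off : Int), (0 : Int)) else ((0 : Int), (off : Int))]) []
      let truePath := (List.range nodes.length).foldl (fun tp i =>
        let x := (nodes.getD i (0, 0)).1 * delta + half
        let y := (nodes.getD i (0, 0)).2 * delta + half
        let v1 : Int × Int := if 0 < i then vecs.getD (i - 1) (0, 0) else (0, 0)
        let v2 : Int × Int := if i < nodes.length - 1 then vecs.getD i (0, 0) else (0, 0)
        tp ++ [(x + v1.1 + v2.1, y + v1.2 + v2.2)]) []
      let index := segs.foldl (fun idx se =>
        let idx := if se.1.1 = se.2.1 then idx.modify ((0 : Int), se.1.1) [] (· ++ [se]) else idx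
        if se.1.2 = se.2.2 then idx.modify ((1 : Int), se.1.2) [] (· ++ [se]) else idx) index
      (index, st.2 ++ [truePath])) (PySem.Dict.empty, [])
  st.2

-- ===== PRECONDITION & SPEC =====
-- Pre_ excludes inputs containing an empty path: there Python A raises IndexError (chain[0]); B raises as well.
def Pre_getTruePaths (paths : List (List (Int × Int))) (delta : Int) : Prop :=
  ∀ p ∈ paths, p ≠ []
instance (paths : List (List (Int × Int))) (delta : Int) : Decidable (Pre_getTruePaths paths delta) := by
  unfold Pre_getTruePaths; infer_instance

def pvWitness_getTruePaths : (List (List (Int × Int))) × Int :=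
  ([[(0, 0), (1, 0), (2, 0)], [(0, 1), (1, 1), (1, 0), (2, 0)]], 4)

def Spec_getTruePaths (paths : List (List (Int × Int))) (delta : Int) (out : List (List (Int × Int))) : Prop := out = getTruePaths_alt paths delta
instance (paths : List (List (Int × Int))) (delta : Int) (out : List (List (Int × Int))) : Decidable (Spec_getTruePaths paths delta out) := by unfold Spec_getTruePaths; infer_instance

-- ===== CLAIM (what is proved, stated in full; the proofs are below) =====
def Claim_equal_getTruePaths : Prop := ∀ (paths : List (List (Int × Int))) (delta : Int), Dom_getTruePaths paths delta → Pre_getTruePaths paths delta → Spec_getTruePaths paths delta (getTruePaths paths delta)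

-- ===== LEMMAS AND PROOFS =====

def segsOf (p : List (Int × Int)) : List ((Int × Int) × (Int × Int)) := p.zip p.tail

-- does segment se land in bucket k of B's index?
def kmB (k : Int × Int) (se : (Int × Int) × (Int × Int)) : Bool :=
  (decide (k = ((0 : Int), se.1.1)) && decide (se.1.1 = se.2.1)) ||
  (decide (k = ((1 : Int), se.1.2)) && decide (se.1.2 = se.2.2))

-- offset vector of the segment se against the collection S of earlier segments
def vecF (S : List ((Int × Int) × (Int × Int))) (se : (Int × Int) × (Int × Int)) : Int × Int :=
  let s := se.1
  let e := se.2
  let d : Int := if s.1 = e.1 then 0 else 1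
  let c : Int := (S.countP (fun se2 => pyOverlap s e se2.1 se2.2 d) : Int)
  let off := if PySem.Int.mod c 2 = 0 then -c else c + 1
  if d = 0 then (off, 0) else (0, off)

def vecAt (nodes : List (Int × Int)) (S : List ((Int × Int) × (Int × Int))) (i : Nat) : Int × Int :=
  vecF S ((segsOf nodes).getD i ((0, 0), (0, 0)))

-- the i-th output point, as a closed form
def pointF (nodes : List (Int × Int)) (S : List ((Int × Int) × (Int × Int))) (delta : Int) (bound : Nat) (i : Nat) : Int × Int :=
  let half := PySem.Int.floordiv delta 2
  let x := (nodes.getD i (0, 0)).1 * delta + half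
  let y := (nodes.getD i (0, 0)).2 * delta + half
  let v1 : Int × Int := if 0 < i then vecAt nodes S (i - 1) else (0, 0)
  let v2 : Int × Int := if i < bound then vecAt nodes S i else (0, 0)
  (x + v1.1 + v2.1, y + v1.2 + v2.2)

-- getD through zip/map plumbing
theorem segsOf_getD (nodes : List (Int × Int)) (i : Nat) (h : i + 1 < nodes.length) :
    (segsOf nodes).getD i ((0, 0), (0, 0)) = (nodes.getD i (0, 0), nodes.getD (i + 1) (0, 0)) := by
  have hl : i < (segsOf nodes).length := by
    simp [segsOf, List.length_zip, List.length_tail]; omega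
  rw [List.getD_eq_getElem _ _ hl]
  have h1 : i < nodes.length := by omega
  have h2 : i < nodes.tail.length := by simp [List.length_tail]; omega
  simp [segsOf, List.getElem_zip, List.getElem_tail,
    List.getElem?_eq_getElem h1, List.getElem?_eq_getElem h]

theorem getD_map_vec (segs : List ((Int × Int) × (Int × Int))) (f : ((Int × Int) × (Int × Int)) → Int × Int)
    (j : Nat) (h : j < segs.length) :
    (segs.map f).getD j (0, 0) = f (segs.getD j ((0, 0), (0, 0))) := by
  have h' : j < (segs.map f).length := by simpa using h
  rw [List.getD_eq_getElem _ _ h', List.getD_eq_getElem _ _ h, List.getElem_map]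

theorem zip_triples (c : List (Int × Int)) :
    c.zip (c.tail.zip c.tail.tail)
      = (PySem.List.pyRange 1 (PySem.List.len c - 1) 1).map (fun ii =>
          (PySem.List.pyGetD c (ii - 1) (0, 0),
           (PySem.List.pyGetD c ii (0, 0), PySem.List.pyGetD c (ii + 1) (0, 0)))) := by
  rw [PySem.List.len_eq, PySem.List.pyRange_one, List.map_map]
  have hn : (((c.length : Int) - 1) - 1).toNat = c.length - 2 := by omega
  rw [hn]
  rw [List.map_congr_left (g := fun k : Nat =>
      (c.getD k (0, 0), (c.getD (k + 1) (0, 0), c.getD (k + 2) (0, 0)))) (by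
    intro k _
    simp only [Function.comp_apply]
    have e2 : (1 : Int) + (k : Int) + 1 = (((k + 2 : Nat)) : Int) := by push_cast; ring
    have e0 : (1 : Int) + (k : Int) - 1 = ((k : Nat) : Int) := by omega
    have e1 : (1 : Int) + (k : Int) = (((k + 1 : Nat)) : Int) := by push_cast; ring
    rw [e2, e0, e1, PySem.List.pyGetD_natCast, PySem.List.pyGetD_natCast, PySem.List.pyGetD_natCast])]
  apply List.ext_getElem
  · simp [List.length_zip, List.length_tail]; omega
  · intro i h1 h2
    have hi : i < c.length - 2 := by simpa using h2
    have g0 : i < c.length := by omega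
    have g1 : i + 1 < c.length := by omega
    have g2 : i + 2 < c.length := by omega
    simp only [List.getElem_zip, List.getElem_map, List.getElem_range, List.getElem_tail]
    rw [List.getD_eq_getElem _ _ g0, List.getD_eq_getElem _ _ g1, List.getD_eq_getElem _ _ g2]

-- 1. the two node computations agree
theorem chain_eq (c : List (Int × Int)) : pyChain2nodes c = altChainToNodes c := by
  unfold pyChain2nodes altChainToNodes
  simp only []
  congr 1
  rw [zip_triples, List.foldl_map]
  apply PySem.List.foldl_congr_mem
  intro acc ii _
  by_cases h1 : (PySem.List.pyGetD c (ii - 1) (0, 0)).1 = (PySem.List.pyGetD c ii (0, 0)).1 ∧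
      (PySem.List.pyGetD c ii (0, 0)).1 = (PySem.List.pyGetD c (ii + 1) (0, 0)).1 <;>
    by_cases h2 : (PySem.List.pyGetD c (ii - 1) (0, 0)).2 = (PySem.List.pyGetD c ii (0, 0)).2 ∧
      (PySem.List.pyGetD c ii (0, 0)).2 = (PySem.List.pyGetD c (ii + 1) (0, 0)).2 <;>
    simp [h1, h2]

-- 2. pyChain2nodes always has at least two nodes
theorem two_le_chain (c : List (Int × Int)) : 2 ≤ (pyChain2nodes c).length := by
  unfold pyChain2nodes
  simp only []
  have grow : ∀ (l : List Int) (init : List (Int × Int)) (f : List (Int × Int) → Int → List (Int × Int)),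
      (∀ acc x, acc.length ≤ (f acc x).length) → init.length ≤ (l.foldl f init).length := by
    intro l
    induction l with
    | nil => intro init f _; simp
    | cons a t ih =>
      intro init f h
      simp only [List.foldl_cons]
      exact le_trans (h init a) (ih (f init a) f h)
  have := grow (PySem.List.pyRange 1 (PySem.List.len c - 1) 1)
    [PySem.List.pyGetD c 0 (0, 0)]
    (fun nodes ii =>
      if (PySem.List.pyGetD c (ii - 1) (0, 0)).1 = (PySem.List.pyGetD c ii (0, 0)).1 ∧
          (PySem.List.pyGetD c ii (0, 0)).1 = (PySem.List.pyGetD c (ii + 1) (0, 0)).1 then nodes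
      else if (PySem.List.pyGetD c (ii - 1) (0, 0)).2 = (PySem.List.pyGetD c ii (0, 0)).2 ∧
          (PySem.List.pyGetD c ii (0, 0)).2 = (PySem.List.pyGetD c (ii + 1) (0, 0)).2 then nodes
      else nodes ++ [PySem.List.pyGetD c ii (0, 0)])
    (by intro acc x; dsimp only; split_ifs <;> simp)
  simp only [List.length_append, List.length_cons, List.length_nil] at this ⊢
  omega

theorem seg_range (p : List (Int × Int)) :
    (PySem.List.pyRange 0 (PySem.List.len p - 1) 1).map (fun kk =>
        (PySem.List.pyGetD p kk (0, 0), PySem.List.pyGetD p (kk + 1) (0, 0)))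
      = segsOf p := by
  rw [PySem.List.len_eq, PySem.List.pyRange_one, List.map_map]
  have hn : (((p.length : Int) - 1) - 0).toNat = p.length - 1 := by omega
  rw [hn]
  rw [List.map_congr_left (g := fun k : Nat =>
      (p.getD k (0, 0), p.getD (k + 1) (0, 0))) (by
    intro k _
    simp only [Function.comp_apply]
    have e1 : (0 : Int) + (k : Int) + 1 = (((k + 1 : Nat)) : Int) := by push_cast; ring
    have e0 : (0 : Int) + (k : Int) = ((k : Nat) : Int) := by omega
    rw [e1, e0, PySem.List.pyGetD_natCast, PySem.List.pyGetD_natCast])]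
  apply List.ext_getElem
  · simp [segsOf, List.length_zip, List.length_tail]
  · intro i h1 h2
    have hi : i < p.length - 1 := by simpa using h1
    have g0 : i < p.length := by omega
    have g1 : i + 1 < p.length := by omega
    simp only [segsOf, List.getElem_zip, List.getElem_map, List.getElem_range, List.getElem_tail]
    rw [List.getD_eq_getElem _ _ g0, List.getD_eq_getElem _ _ g1]

-- 3. A's count over all earlier segments, as a countP
theorem countA_eq (nps : List (List (Int × Int))) (nodes : List (Int × Int)) (s e : Int × Int) (d : Int) :
    pyCountOverlap (nps ++ [nodes]) s e d
      = ((nps.flatMap segsOf).countP (fun se2 => pyOverlap s e se2.1 se2.2 d) : Int) := by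
  unfold pyCountOverlap
  rw [PySem.List.slice_to_neg_one, List.dropLast_concat]
  have inner : ∀ (cnt : Int) (p : List (Int × Int)),
      (PySem.List.pyRange 0 (PySem.List.len p - 1) 1).foldl (fun count kk =>
        if pyOverlap s e (PySem.List.pyGetD p kk (0, 0)) (PySem.List.pyGetD p (kk + 1) (0, 0)) d
        then count + 1 else count) cnt
      = cnt + ((segsOf p).countP (fun se2 => pyOverlap s e se2.1 se2.2 d) : Int) := by
    intro cnt p
    rw [PySem.List.foldl_if_add_one]
    congr 2
    rw [← seg_range p, List.countP_map]
    rfl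
  calc nps.foldl (fun count path =>
        (PySem.List.pyRange 0 (PySem.List.len path - 1) 1).foldl (fun count kk =>
          if pyOverlap s e (PySem.List.pyGetD path kk (0, 0)) (PySem.List.pyGetD path (kk + 1) (0, 0)) d
          then count + 1 else count) count) 0
      = nps.foldl (fun count path =>
          count + ((segsOf path).countP (fun se2 => pyOverlap s e se2.1 se2.2 d) : Int)) 0 := by
        apply PySem.List.foldl_congr_mem
        intro acc p _
        exact inner acc p
    _ = ((nps.flatMap segsOf).countP (fun se2 => pyOverlap s e se2.1 se2.2 d) : Int) := by
        rw [PySem.List.foldl_add (g := fun p => ((segsOf p).countP (fun se2 => pyOverlap s e se2.1 se2.2 d) : Int))]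
        induction nps with
        | nil => simp
        | cons p t ih =>
          simp only [List.map_cons, List.sum_cons, List.flatMap_cons, List.countP_append] at *
          push_cast at *
          omega

-- 4. B's insertion loop grows every bucket by exactly its matching segments
theorem bucket_step (se : (Int × Int) × (Int × Int))
    (idx : PySem.Dict (Int × Int) (List ((Int × Int) × (Int × Int)))) (k : Int × Int) :
    ((fun idx (se : (Int × Int) × (Int × Int)) =>
        let idx := if se.1.1 = se.2.1 then idx.modify ((0 : Int), se.1.1) [] (· ++ [se]) else idx
        if se.1.2 = se.2.2 then idx.modify ((1 : Int), se.1.2) [] (· ++ [se]) else idx) idx se).getD k []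
      = idx.getD k [] ++ (if kmB k se then [se] else []) := by
  dsimp only
  by_cases h1 : se.1.1 = se.2.1 <;> by_cases h2 : se.1.2 = se.2.2
  · rw [if_pos h1, if_pos h2, PySem.Dict.getD_modify]
    by_cases hk1 : k = ((1 : Int), se.1.2)
    · rw [if_pos hk1, PySem.Dict.getD_modify,
        if_neg (show ¬((1 : Int), se.1.2) = ((0 : Int), se.1.1) by simp), hk1]
      simp [kmB, h2]
    · rw [if_neg hk1, PySem.Dict.getD_modify]
      by_cases hk0 : k = ((0 : Int), se.1.1)
      · rw [if_pos hk0, hk0]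
        simp [kmB, h1]
      · rw [if_neg hk0]
        simp [kmB, hk0, hk1]
  · rw [if_pos h1, if_neg h2, PySem.Dict.getD_modify]
    by_cases hk0 : k = ((0 : Int), se.1.1)
    · rw [if_pos hk0, hk0]
      simp [kmB, h1]
    · rw [if_neg hk0]
      simp [kmB, hk0, h2]
  · rw [if_neg h1, if_pos h2, PySem.Dict.getD_modify]
    by_cases hk1 : k = ((1 : Int), se.1.2)
    · rw [if_pos hk1, hk1]
      simp [kmB, h2]
    · rw [if_neg hk1]
      simp [kmB, hk1, h1]
  · rw [if_neg h1, if_neg h2]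
    simp [kmB, h1, h2]

theorem bucket_eq (segs : List ((Int × Int) × (Int × Int)))
    (idx : PySem.Dict (Int × Int) (List ((Int × Int) × (Int × Int)))) (k : Int × Int) :
    (segs.foldl (fun idx se =>
        let idx := if se.1.1 = se.2.1 then idx.modify ((0 : Int), se.1.1) [] (· ++ [se]) else idx
        if se.1.2 = se.2.2 then idx.modify ((1 : Int), se.1.2) [] (· ++ [se]) else idx) idx).getD k []
      = idx.getD k [] ++ segs.filter (kmB k) := by
  induction segs generalizing idx with
  | nil => simp
  | cons se rest ih =>
    simp only [List.foldl_cons]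
    rw [ih, bucket_step se idx k]
    by_cases hk : kmB k se <;> simp [hk]

-- 5. pointwise: A's overlap test = bucket membership && B's interval test
theorem overlap_split (s e a b : Int × Int) :
    pyOverlap s e a b (if s.1 = e.1 then 0 else 1)
      = (kmB ((if s.1 = e.1 then 0 else 1 : Int), pyProj s (if s.1 = e.1 then 0 else 1)) (a, b) &&
         (let d : Int := if s.1 = e.1 then 0 else 1
          decide ((pyProj s (1 - d) ≤ pyProj a (1 - d) ∧ pyProj a (1 - d) ≤ pyProj e (1 - d)) ∨
                  (pyProj s (1 - d) ≤ pyProj b (1 - d) ∧ pyProj b (1 - d) ≤ pyProj e (1 - d))))) := by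
  by_cases hd : s.1 = e.1 <;>
    simp only [hd, if_true, if_false, pyOverlap, pyProj, kmB, Prod.ext_iff] <;>
    norm_num <;>
    by_cases hab : a.1 = b.1 <;> by_cases hab2 : a.2 = b.2 <;>
    by_cases hbs : b.1 = s.1 <;> by_cases hbs2 : b.2 = s.2 <;>
    simp_all <;> omega

-- the bridge between B's bucket count and A's global count
theorem count_bridge (S : List ((Int × Int) × (Int × Int))) (s e : Int × Int) :
    List.countP (fun a =>
        (decide ((pyProj s (1 - (if s.1 = e.1 then 0 else 1)) ≤ pyProj a.1 (1 - (if s.1 = e.1 then 0 else 1)) ∧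
                  pyProj a.1 (1 - (if s.1 = e.1 then 0 else 1)) ≤ pyProj e (1 - (if s.1 = e.1 then 0 else 1))) ∨
                 (pyProj s (1 - (if s.1 = e.1 then 0 else 1)) ≤ pyProj a.2 (1 - (if s.1 = e.1 then 0 else 1)) ∧
                  pyProj a.2 (1 - (if s.1 = e.1 then 0 else 1)) ≤ pyProj e (1 - (if s.1 = e.1 then 0 else 1)))) &&
         kmB ((if s.1 = e.1 then 0 else 1 : Int), pyProj s (if s.1 = e.1 then 0 else 1)) a)) S
      = List.countP (fun se2 => pyOverlap s e se2.1 se2.2 (if s.1 = e.1 then 0 else 1)) S := by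
  apply List.countP_congr
  intro a _
  rw [Bool.and_comm, overlap_split s e a.1 a.2]

-- 6. given correct buckets, B's per-segment vector is vecF
theorem vecB_eq (S : List ((Int × Int) × (Int × Int)))
    (idx : PySem.Dict (Int × Int) (List ((Int × Int) × (Int × Int))))
    (hb : ∀ k, idx.getD k [] = S.filter (kmB k)) (se : (Int × Int) × (Int × Int)) :
    (let s := se.1
     let e := se.2
     let d : Int := if s.1 = e.1 then 0 else 1
     let c : Int := (idx.getD (d, pyProj s d) []).foldl (fun c p =>
        if (pyProj s (1 - d) ≤ pyProj p.1 (1 - d) ∧ pyProj p.1 (1 - d) ≤ pyProj e (1 - d)) ∨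
           (pyProj s (1 - d) ≤ pyProj p.2 (1 - d) ∧ pyProj p.2 (1 - d) ≤ pyProj e (1 - d)) then c + 1
        else c) 0
     let off := if PySem.Int.mod c 2 = 0 then -c else c + 1
     (if d = 0 then ((off : Int), (0 : Int)) else ((0 : Int), (off : Int)))) = vecF S se := by
  simp only [vecF, hb]
  rw [PySem.List.foldl_ite_add_one, List.countP_filter, count_bridge, zero_add]

theorem pointF_congr (nodes : List (Int × Int)) (S : List ((Int × Int) × (Int × Int))) (delta : Int)
    (b b' i : Nat) (h : i < b ↔ i < b') :
    pointF nodes S delta b i = pointF nodes S delta b' i := by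
  by_cases hi : i < b
  · simp only [pointF, if_pos hi, if_pos (h.mp hi)]
  · simp only [pointF, if_neg hi, if_neg (fun hh => hi (h.mpr hh))]

set_option maxHeartbeats 1000000 in
theorem addOffset_vecF (C : Int × Int) (S : List ((Int × Int) × (Int × Int))) (s e : Int × Int) :
    pyAddOffset C (pyGetOffset ((S.countP (fun se2 => pyOverlap s e se2.1 se2.2 (if s.1 = e.1 then 0 else 1)) : Int)))
        (if s.1 = e.1 then 0 else 1)
      = (C.1 + (vecF S (s, e)).1, C.2 + (vecF S (s, e)).2) := by
  unfold pyAddOffset pyGetOffset vecF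
  by_cases hd : s.1 = e.1
  · simp only [eq_true hd, if_true]
    rw [Prod.mk.injEq]
    constructor <;> ring
  · simp only [eq_false hd, if_false, show ((1 : Int) = 0) = False from by simp]
    rw [Prod.mk.injEq]
    constructor <;> ring

-- 7. A's truePath loop computes the closed form
set_option maxHeartbeats 1600000 in
theorem tpA_eq (nodes : List (Int × Int)) (S : List ((Int × Int) × (Int × Int))) (delta : Int)
    (h2 : 2 ≤ nodes.length) :
    (PySem.List.pyRange 0 (PySem.List.len nodes - 1) 1).foldl
      (fun truePath jj =>
        let s := PySem.List.pyGetD nodes jj (0, 0)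
        let e := PySem.List.pyGetD nodes (jj + 1) (0, 0)
        let d : Int := if s.1 = e.1 then 0 else 1
        let c := (S.countP (fun se2 => pyOverlap s e se2.1 se2.2 d) : Int)
        let offset := pyGetOffset c
        let truePath := if jj = 0 then
            truePath ++ [(s.1 * delta + PySem.Int.floordiv delta 2, s.2 * delta + PySem.Int.floordiv delta 2)]
          else truePath
        let truePath := truePath.dropLast ++ [pyAddOffset (PySem.List.pyGetD truePath (-1) (0, 0)) offset d]
        let truePath := truePath ++ [(e.1 * delta + PySem.Int.floordiv delta 2, e.2 * delta + PySem.Int.floordiv delta 2)]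
        truePath.dropLast ++ [pyAddOffset (PySem.List.pyGetD truePath (-1) (0, 0)) offset d]) []
      = (List.range nodes.length).map (pointF nodes S delta (nodes.length - 1)) := by
  have hmi : (PySem.List.len nodes - 1 : Int) = ((nodes.length - 1 : Nat) : Int) := by
    rw [PySem.List.len_eq]; omega
  rw [hmi]
  have main : ∀ t : Nat, 1 ≤ t → t + 1 ≤ nodes.length →
      (PySem.List.pyRange 0 ((t : Nat) : Int) 1).foldl
        (fun truePath jj =>
          let s := PySem.List.pyGetD nodes jj (0, 0)
          let e := PySem.List.pyGetD nodes (jj + 1) (0, 0)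
          let d : Int := if s.1 = e.1 then 0 else 1
          let c := (S.countP (fun se2 => pyOverlap s e se2.1 se2.2 d) : Int)
          let offset := pyGetOffset c
          let truePath := if jj = 0 then
              truePath ++ [(s.1 * delta + PySem.Int.floordiv delta 2, s.2 * delta + PySem.Int.floordiv delta 2)]
            else truePath
          let truePath := truePath.dropLast ++ [pyAddOffset (PySem.List.pyGetD truePath (-1) (0, 0)) offset d]
          let truePath := truePath ++ [(e.1 * delta + PySem.Int.floordiv delta 2, e.2 * delta + PySem.Int.floordiv delta 2)]
          truePath.dropLast ++ [pyAddOffset (PySem.List.pyGetD truePath (-1) (0, 0)) offset d]) []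
        = (List.range (t + 1)).map (pointF nodes S delta t) := by
    intro t
    induction t with
    | zero => intro h; exact absurd h (by norm_num)
    | succ t ih =>
      intro _ hlen
      rcases Nat.eq_zero_or_pos t with ht0 | ht1
      · subst ht0
        have hr : PySem.List.pyRange 0 ((0 + 1 : Nat) : Int) 1 = [0] := by
          rw [show ((0 + 1 : Nat) : Int) = (0 : Int) + 1 by norm_num, PySem.List.pyRange_one_singleton]
        rw [hr]
        simp only [List.foldl_cons, List.foldl_nil]
        have hseg0 : (segsOf nodes).getD 0 ((0, 0), (0, 0)) = (nodes.getD 0 (0, 0), nodes.getD 1 (0, 0)) := by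
          simpa using segsOf_getD nodes 0 (by omega)
        have hsing : ∀ (x : Int × Int), PySem.List.pyGetD [x] (-1) ((0 : Int), (0 : Int)) = x := by
          intro x
          simpa using PySem.List.pyGetD_neg_one_append_singleton (xs := ([] : List (Int × Int)))
            (x := x) (d := ((0 : Int), (0 : Int)))
        have e01 : (0 : Int) + 1 = ((1 : Nat) : Int) := by norm_num
        simp only [e01, PySem.List.pyGetD_zero, PySem.List.pyGetD_natCast,
          if_true, List.nil_append]
        rw [hsing]
        have hds : ∀ (x : Int × Int), [x].dropLast = ([] : List (Int × Int)) := fun _ => rfl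
        simp only [hds, List.nil_append, List.dropLast_concat,
          PySem.List.pyGetD_neg_one_append_singleton]
        rw [List.singleton_append, show List.range (0 + 1 + 1) = [0, 1] from rfl]
        simp only [List.map_cons, List.map_nil]
        rw [addOffset_vecF, addOffset_vecF, ← hseg0]
        have hp0 : pointF nodes S delta (0 + 1) 0
            = ((nodes.getD 0 (0, 0)).1 * delta + PySem.Int.floordiv delta 2 + 0 + (vecAt nodes S 0).1,
               (nodes.getD 0 (0, 0)).2 * delta + PySem.Int.floordiv delta 2 + 0 + (vecAt nodes S 0).2) := by
          simp [pointF]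
        have hp1 : pointF nodes S delta (0 + 1) 1
            = ((nodes.getD 1 (0, 0)).1 * delta + PySem.Int.floordiv delta 2 + (vecAt nodes S 0).1 + 0,
               (nodes.getD 1 (0, 0)).2 * delta + PySem.Int.floordiv delta 2 + (vecAt nodes S 0).2 + 0) := by
          simp [pointF]
        rw [hp0, hp1]
        simp only [vecAt, Prod.mk.injEq, List.cons.injEq, and_true]
        refine ⟨⟨by ring, by ring⟩, by ring, by ring⟩
      · have hc : ((t + 1 : Nat) : Int) = ((t : Nat) : Int) + 1 := by push_cast; ring
        rw [hc, PySem.List.pyRange_one_succ_right (by exact_mod_cast Int.natCast_nonneg t)]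
        rw [List.foldl_append, ih ht1 (by omega)]
        simp only [List.foldl_cons, List.foldl_nil]
        have hjj : ¬ ((t : Nat) : Int) = 0 := by omega
        have het : ((t : Nat) : Int) + 1 = (((t + 1 : Nat)) : Int) := by push_cast; ring
        have hsegt := segsOf_getD nodes t (by omega)
        have hrange : (List.range (t + 1)).map (pointF nodes S delta t)
            = (List.range t).map (pointF nodes S delta (t + 1)) ++ [pointF nodes S delta t t] := by
          rw [List.range_succ, List.map_append]
          congr 1
          apply List.map_congr_left
          intro i hi
          exact pointF_congr nodes S delta t (t + 1) i (by
            have := List.mem_range.mp hi; omega)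
        rw [hrange]
        rw [show (List.range (t + 1 + 1)).map (pointF nodes S delta (t + 1))
            = (List.range t).map (pointF nodes S delta (t + 1)) ++
              [pointF nodes S delta (t + 1) t] ++ [pointF nodes S delta (t + 1) (t + 1)] from by
          rw [List.range_succ, List.range_succ, List.map_append, List.map_append]
          simp]
        simp only [het, PySem.List.pyGetD_natCast, if_neg hjj, List.dropLast_concat,
          PySem.List.pyGetD_neg_one_append_singleton]
        congr 1
        · congr 1
          rw [addOffset_vecF, ← hsegt]
          have hv1 : pointF nodes S delta t t
              = ((nodes.getD t (0, 0)).1 * delta + PySem.Int.floordiv delta 2 + (vecAt nodes S (t - 1)).1 + 0,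
                 (nodes.getD t (0, 0)).2 * delta + PySem.Int.floordiv delta 2 + (vecAt nodes S (t - 1)).2 + 0) := by
            simp [pointF, ht1]
          have hv2 : pointF nodes S delta (t + 1) t
              = ((nodes.getD t (0, 0)).1 * delta + PySem.Int.floordiv delta 2 + (vecAt nodes S (t - 1)).1
                  + (vecAt nodes S t).1,
                 (nodes.getD t (0, 0)).2 * delta + PySem.Int.floordiv delta 2 + (vecAt nodes S (t - 1)).2
                  + (vecAt nodes S t).2) := by
            simp [pointF, ht1]
          rw [hv1, hv2]
          simp only [vecAt, List.cons.injEq, and_true, Prod.mk.injEq]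
          constructor <;> ring
        · rw [addOffset_vecF, ← hsegt]
          have hv3 : pointF nodes S delta (t + 1) (t + 1)
              = ((nodes.getD (t + 1) (0, 0)).1 * delta + PySem.Int.floordiv delta 2 + (vecAt nodes S t).1 + 0,
                 (nodes.getD (t + 1) (0, 0)).2 * delta + PySem.Int.floordiv delta 2 + (vecAt nodes S t).2 + 0) := by
            simp [pointF]
          rw [hv3]
          simp only [vecAt, Prod.mk.injEq, List.cons.injEq, and_true]
          constructor <;> ring
  have hfin := main (nodes.length - 1) (by omega) (by omega)
  rw [hfin, show nodes.length - 1 + 1 = nodes.length by omega]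

-- 8. B's truePath computation equals the closed form
set_option maxHeartbeats 1600000 in
theorem tpB_eq (nodes : List (Int × Int)) (S : List ((Int × Int) × (Int × Int)))
    (idx : PySem.Dict (Int × Int) (List ((Int × Int) × (Int × Int)))) (delta : Int)
    (hb : ∀ k, idx.getD k [] = S.filter (kmB k)) (h2 : 2 ≤ nodes.length) :
    (List.range nodes.length).foldl (fun tp i =>
        let x := (nodes.getD i (0, 0)).1 * delta + PySem.Int.floordiv delta 2
        let y := (nodes.getD i (0, 0)).2 * delta + PySem.Int.floordiv delta 2
        let v1 : Int × Int := if 0 < i then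
            ((nodes.zip nodes.tail).foldl (fun vecs se =>
              let s := se.1
              let e := se.2
              let d : Int := if s.1 = e.1 then 0 else 1
              let c : Int := (idx.getD (d, pyProj s d) []).foldl (fun c p =>
                if (pyProj s (1 - d) ≤ pyProj p.1 (1 - d) ∧ pyProj p.1 (1 - d) ≤ pyProj e (1 - d)) ∨
                   (pyProj s (1 - d) ≤ pyProj p.2 (1 - d) ∧ pyProj p.2 (1 - d) ≤ pyProj e (1 - d)) then c + 1
                else c) 0
              let off := if PySem.Int.mod c 2 = 0 then -c else c + 1
              vecs ++ [if d = 0 then ((off : Int), (0 : Int)) else ((0 : Int), (off : Int))]) []).getD (i - 1) (0, 0)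
          else (0, 0)
        let v2 : Int × Int := if i < nodes.length - 1 then
            ((nodes.zip nodes.tail).foldl (fun vecs se =>
              let s := se.1
              let e := se.2
              let d : Int := if s.1 = e.1 then 0 else 1
              let c : Int := (idx.getD (d, pyProj s d) []).foldl (fun c p =>
                if (pyProj s (1 - d) ≤ pyProj p.1 (1 - d) ∧ pyProj p.1 (1 - d) ≤ pyProj e (1 - d)) ∨
                   (pyProj s (1 - d) ≤ pyProj p.2 (1 - d) ∧ pyProj p.2 (1 - d) ≤ pyProj e (1 - d)) then c + 1
                else c) 0
              let off := if PySem.Int.mod c 2 = 0 then -c else c + 1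
              vecs ++ [if d = 0 then ((off : Int), (0 : Int)) else ((0 : Int), (off : Int))]) []).getD i (0, 0)
          else (0, 0)
        tp ++ [(x + v1.1 + v2.1, y + v1.2 + v2.2)]) []
      = (List.range nodes.length).map (pointF nodes S delta (nodes.length - 1)) := by
  have hvecs : (nodes.zip nodes.tail).foldl (fun vecs se =>
      let s := se.1
      let e := se.2
      let d : Int := if s.1 = e.1 then 0 else 1
      let c : Int := (idx.getD (d, pyProj s d) []).foldl (fun c p =>
        if (pyProj s (1 - d) ≤ pyProj p.1 (1 - d) ∧ pyProj p.1 (1 - d) ≤ pyProj e (1 - d)) ∨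
           (pyProj s (1 - d) ≤ pyProj p.2 (1 - d) ∧ pyProj p.2 (1 - d) ≤ pyProj e (1 - d)) then c + 1
        else c) 0
      let off := if PySem.Int.mod c 2 = 0 then -c else c + 1
      vecs ++ [if d = 0 then ((off : Int), (0 : Int)) else ((0 : Int), (off : Int))]) []
      = (segsOf nodes).map (vecF S) := by
    have hcong := PySem.List.foldl_congr_mem
      (l := nodes.zip nodes.tail) (init := ([] : List (Int × Int)))
      (f := fun vecs se =>
        let s := se.1
        let e := se.2
        let d : Int := if s.1 = e.1 then 0 else 1
        let c : Int := (idx.getD (d, pyProj s d) []).foldl (fun c p =>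
          if (pyProj s (1 - d) ≤ pyProj p.1 (1 - d) ∧ pyProj p.1 (1 - d) ≤ pyProj e (1 - d)) ∨
             (pyProj s (1 - d) ≤ pyProj p.2 (1 - d) ∧ pyProj p.2 (1 - d) ≤ pyProj e (1 - d)) then c + 1
          else c) 0
        let off := if PySem.Int.mod c 2 = 0 then -c else c + 1
        vecs ++ [if d = 0 then ((off : Int), (0 : Int)) else ((0 : Int), (off : Int))])
      (g := fun vecs se => vecs ++ [vecF S se])
      (by
        intro acc se _
        exact congrArg (fun v => acc ++ [v]) (vecB_eq S idx hb se))
    rw [hcong, PySem.List.foldl_append_singleton_eq_map]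
    rfl
  rw [hvecs]
  rw [PySem.List.foldl_append_singleton_eq_map, List.nil_append]
  apply List.map_congr_left
  intro i hi
  have him : i < nodes.length := List.mem_range.mp hi
  have hlseg : (segsOf nodes).length = nodes.length - 1 := by
    simp [segsOf, List.length_zip, List.length_tail]
  by_cases h0 : 0 < i <;> by_cases hlt : i < nodes.length - 1
  · simp only [pointF, if_pos h0, if_pos hlt]
    rw [getD_map_vec _ _ _ (by rw [hlseg]; omega), getD_map_vec _ _ _ (by rw [hlseg]; omega)]
    simp only [vecAt]
  · simp only [pointF, if_pos h0, if_neg hlt]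
    rw [getD_map_vec _ _ _ (by rw [hlseg]; omega)]
    simp only [vecAt]
  · simp only [pointF, if_neg h0, if_pos hlt]
    rw [getD_map_vec _ _ _ (by rw [hlseg]; omega)]
    simp only [vecAt]
  · simp only [pointF, if_neg h0, if_neg hlt]

-- 9. the two per-path step functions, and the simultaneous loop invariant
def stepA (paths : List (List (Int × Int))) (delta : Int)
    (st : List (List (Int × Int)) × List (List (Int × Int))) (ii : Int) :
    List (List (Int × Int)) × List (List (Int × Int)) :=
  let truePaths := st.1
  let path := PySem.List.pyGetD paths ii []
  let nodePath := pyChain2nodes path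
  let nodePaths := st.2 ++ [nodePath]
  let truePath := (PySem.List.pyRange 0 (PySem.List.len nodePath - 1) 1).foldl
    (fun truePath jj =>
      let s := PySem.List.pyGetD nodePath jj (0, 0)
      let e := PySem.List.pyGetD nodePath (jj + 1) (0, 0)
      let d : Int := if s.1 = e.1 then 0 else 1
      let c := pyCountOverlap nodePaths s e d
      let offset := pyGetOffset c
      let truePath := if jj = 0 then
          truePath ++ [(s.1 * delta + PySem.Int.floordiv delta 2, s.2 * delta + PySem.Int.floordiv delta 2)]
        else truePath
      let truePath := truePath.dropLast ++ [pyAddOffset (PySem.List.pyGetD truePath (-1) (0, 0)) offset d]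
      let truePath := truePath ++ [(e.1 * delta + PySem.Int.floordiv delta 2, e.2 * delta + PySem.Int.floordiv delta 2)]
      truePath.dropLast ++ [pyAddOffset (PySem.List.pyGetD truePath (-1) (0, 0)) offset d]) []
  (truePaths ++ [truePath], nodePaths)

def stepB (paths : List (List (Int × Int))) (delta : Int)
    (st : PySem.Dict (Int × Int) (List ((Int × Int) × (Int × Int))) × List (List (Int × Int))) (ii : Int) :
    PySem.Dict (Int × Int) (List ((Int × Int) × (Int × Int))) × List (List (Int × Int)) :=
  let path := PySem.List.pyGetD paths ii []
  let index := st.1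
  let nodes := altChainToNodes path
  let segs := nodes.zip nodes.tail
  let vecs : List (Int × Int) := segs.foldl (fun vecs se =>
    let s := se.1
    let e := se.2
    let d : Int := if s.1 = e.1 then 0 else 1
    let c : Int := (index.getD (d, pyProj s d) []).foldl (fun c p =>
      if (pyProj s (1 - d) ≤ pyProj p.1 (1 - d) ∧ pyProj p.1 (1 - d) ≤ pyProj e (1 - d)) ∨
         (pyProj s (1 - d) ≤ pyProj p.2 (1 - d) ∧ pyProj p.2 (1 - d) ≤ pyProj e (1 - d)) then c + 1
      else c) 0
    let off := if PySem.Int.mod c 2 = 0 then -c else c + 1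
    vecs ++ [if d = 0 then ((off : Int), (0 : Int)) else ((0 : Int), (off : Int))]) []
  let truePath := (List.range nodes.length).foldl (fun tp i =>
    let x := (nodes.getD i (0, 0)).1 * delta + PySem.Int.floordiv delta 2
    let y := (nodes.getD i (0, 0)).2 * delta + PySem.Int.floordiv delta 2
    let v1 : Int × Int := if 0 < i then vecs.getD (i - 1) (0, 0) else (0, 0)
    let v2 : Int × Int := if i < nodes.length - 1 then vecs.getD i (0, 0) else (0, 0)
    tp ++ [(x + v1.1 + v2.1, y + v1.2 + v2.2)]) []
  let index := segs.foldl (fun idx se =>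
    let idx := if se.1.1 = se.2.1 then idx.modify ((0 : Int), se.1.1) [] (· ++ [se]) else idx
    if se.1.2 = se.2.2 then idx.modify ((1 : Int), se.1.2) [] (· ++ [se]) else idx) index
  (index, st.2 ++ [truePath])

theorem stepA_eq (paths : List (List (Int × Int))) (delta : Int)
    (tps nps : List (List (Int × Int))) (ii : Int) :
    stepA paths delta (tps, nps) ii
      = (tps ++ [(List.range (altChainToNodes (PySem.List.pyGetD paths ii [])).length).map
            (pointF (altChainToNodes (PySem.List.pyGetD paths ii [])) (nps.flatMap segsOf) delta
              ((altChainToNodes (PySem.List.pyGetD paths ii [])).length - 1))],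
         nps ++ [altChainToNodes (PySem.List.pyGetD paths ii [])]) := by
  unfold stepA
  dsimp only
  rw [Prod.mk.injEq]
  refine ⟨?_, by rw [chain_eq]⟩
  simp only [chain_eq, countA_eq]
  exact congrArg (fun x => tps ++ [x])
    (tpA_eq _ _ _ (chain_eq (PySem.List.pyGetD paths ii []) ▸ two_le_chain _))

theorem stepB_eq (paths : List (List (Int × Int))) (delta : Int)
    (tps nps : List (List (Int × Int))) (ii : Int)
    (idx : PySem.Dict (Int × Int) (List ((Int × Int) × (Int × Int))))
    (hb : ∀ k, idx.getD k [] = (nps.flatMap segsOf).filter (kmB k)) :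
    stepB paths delta (idx, tps) ii
      = ((segsOf (altChainToNodes (PySem.List.pyGetD paths ii []))).foldl (fun idx se =>
            let idx := if se.1.1 = se.2.1 then idx.modify ((0 : Int), se.1.1) [] (· ++ [se]) else idx
            if se.1.2 = se.2.2 then idx.modify ((1 : Int), se.1.2) [] (· ++ [se]) else idx) idx,
         tps ++ [(List.range (altChainToNodes (PySem.List.pyGetD paths ii [])).length).map
            (pointF (altChainToNodes (PySem.List.pyGetD paths ii [])) (nps.flatMap segsOf) delta
              ((altChainToNodes (PySem.List.pyGetD paths ii [])).length - 1))]) := by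
  unfold stepB
  dsimp only
  rw [Prod.mk.injEq]
  refine ⟨rfl, ?_⟩
  exact congrArg (fun x => tps ++ [x])
    (tpB_eq _ (nps.flatMap segsOf) idx delta hb
      (chain_eq (PySem.List.pyGetD paths ii []) ▸ two_le_chain _))

theorem main_rel (paths : List (List (Int × Int))) (delta : Int) :
    ∀ (l : List Int) (tps nps : List (List (Int × Int)))
      (idx : PySem.Dict (Int × Int) (List ((Int × Int) × (Int × Int)))),
      (∀ k, idx.getD k [] = (nps.flatMap segsOf).filter (kmB k)) →
      (l.foldl (stepA paths delta) (tps, nps)).1 = (l.foldl (stepB paths delta) (idx, tps)).2 := by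
  intro l
  induction l with
  | nil => intro tps nps idx hb; rfl
  | cons ii rest ih =>
    intro tps nps idx hb
    simp only [List.foldl_cons]
    rw [stepA_eq, stepB_eq paths delta tps nps ii idx hb]
    apply ih
    intro k
    rw [bucket_eq, hb k, List.flatMap_append]
    simp [List.filter_append, segsOf]

-- ===== VERDICT (by name: the statement is the Claim_ definition above) =====
set_option maxHeartbeats 1600000 in
theorem getTruePaths_spec : Claim_equal_getTruePaths := by
  intro paths delta _ _
  unfold Spec_getTruePaths getTruePaths getTruePaths_alt
  simp only []
  conv_rhs => rw [← PySem.List.map_pyGetD_pyRange_zero paths ([] : List (Int × Int)), List.foldl_map]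
  exact main_rel paths delta (PySem.List.pyRange 0 (PySem.List.len paths) 1) [] [] PySem.Dict.empty
    (by intro k; simp)
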